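-- pv_equiv track=rewrite | github.com/Pyk017/Important-Algorithms | Longest_Increasing_Subsequence(LIS)/Maximum_Sum_Increasing_Subsequence.py | alterantive
-- ===== SOURCE A (Python) =====
-- def alterantive(a):
--     a.sort()
--     if a[-1] < 0:
--         return a[-1]
--     else:
--         s = 0
--         for i in a:
--             if i > 0:
--                 s += i
--         return s
-- ===== SOURCE B (Python) =====
-- def alterantive(a):
--     m = None
--     s = 0
--     for i in a:
--         if m is None or i > m:
--             m = i
--         if i > 0:
--             s += i
--     if m < 0:
--         return m
--     return s
-- ===== Notes on version B (the rewrite author's own statement) =====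
-- stated objective: faster
-- what changed: B replaces A's sort-then-scan (sort to find the maximum via a[-1], then a second loop summing positives) with a single pass that tracks the running maximum and the sum of positives simultaneously.
import Mathlib
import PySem

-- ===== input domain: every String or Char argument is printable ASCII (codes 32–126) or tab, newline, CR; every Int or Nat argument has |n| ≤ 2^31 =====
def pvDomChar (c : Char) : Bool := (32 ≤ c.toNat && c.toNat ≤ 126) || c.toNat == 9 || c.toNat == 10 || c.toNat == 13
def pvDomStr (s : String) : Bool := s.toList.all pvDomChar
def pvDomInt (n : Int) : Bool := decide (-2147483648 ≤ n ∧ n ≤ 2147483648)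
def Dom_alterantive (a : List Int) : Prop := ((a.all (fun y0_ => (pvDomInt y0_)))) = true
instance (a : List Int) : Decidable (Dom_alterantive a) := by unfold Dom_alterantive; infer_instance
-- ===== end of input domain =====

-- B replaces A's sort-then-scan with a single pass tracking the running maximum and the
-- sum of positives; equivalence is about the RETURN value only (A sorts its argument in place).

-- ===== PORT A =====
def alterantive (a : List Int) : Int :=
  -- a.sort()
  let b := PySem.List.sorted a (fun x => x) false
  -- a[-1]  (IndexError on empty, excluded by Pre_)
  match PySem.List.pyGet? b (-1) with
  | none => 0
  | some last =>
    if last < 0 then last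
    else b.foldl (fun s i => if i > 0 then s + i else s) 0

-- ===== PORT B =====
def alterantive_alt (a : List Int) : Int :=
  let p := a.foldl (fun (p : Option Int × Int) i =>
      ((match p.1 with
        | none => some i
        | some m => if i > m then some i else some m),
       if i > 0 then p.2 + i else p.2)) (none, 0)
  -- 'm < 0' with m = None raises TypeError on the empty list, excluded by Pre_
  match p.1 with
  | none => 0
  | some m => if m < 0 then m else p.2

-- ===== PRECONDITION & SPEC =====
-- both programs raise on the empty list (A: IndexError on a[-1]; B: TypeError on None < 0)
def Pre_alterantive (a : List Int) : Prop := a ≠ []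
instance (a : List Int) : Decidable (Pre_alterantive a) := by unfold Pre_alterantive; infer_instance
def pvWitness_alterantive : List Int := [3, -1, 2]

def Spec_alterantive (a : List Int) (out : Int) : Prop := out = alterantive_alt a
instance (a : List Int) (out : Int) : Decidable (Spec_alterantive a out) := by unfold Spec_alterantive; infer_instance

-- ===== CLAIM (what is proved, stated in full; the proofs are below) =====
def Claim_equal_alterantive : Prop := ∀ (a : List Int), Dom_alterantive a → Pre_alterantive a → Spec_alterantive a (alterantive a)

-- ===== LEMMAS AND PROOFS =====

-- B's combined fold, split into its two components (from a 'some' state)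
theorem bfold_split (xs : List Int) (m0 s0 : Int) :
    xs.foldl (fun (p : Option Int × Int) i =>
      ((match p.1 with
        | none => some i
        | some m => if i > m then some i else some m),
       if i > 0 then p.2 + i else p.2)) (some m0, s0)
    = (some (xs.foldl (fun m i => if i > m then i else m) m0),
       xs.foldl (fun s i => if i > 0 then s + i else s) s0) := by
  induction xs generalizing m0 s0 with
  | nil => rfl
  | cons x xs ih =>
    rw [List.foldl_cons, List.foldl_cons, List.foldl_cons]
    by_cases h : x > m0 <;> simp [h, ih]

-- the max-fold is max
theorem maxfold_eq (xs : List Int) (m0 : Int) :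
    xs.foldl (fun m i => if i > m then i else m) m0 = xs.foldl max m0 := by
  induction xs generalizing m0 with
  | nil => rfl
  | cons x xs ih =>
    simp only [List.foldl_cons, ih]
    congr 1
    by_cases h : x > m0 <;> simp [h, max_def] <;> omega

theorem le_maxfold (xs : List Int) (m0 : Int) : m0 ≤ xs.foldl max m0 := by
  induction xs generalizing m0 with
  | nil => simp
  | cons x xs ih => exact le_trans (le_max_left m0 x) (ih (max m0 x))

theorem mem_le_maxfold (xs : List Int) (m0 y : Int) (hy : y ∈ xs) : y ≤ xs.foldl max m0 := by
  induction xs generalizing m0 with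
  | nil => cases hy
  | cons x xs ih =>
    rcases List.mem_cons.mp hy with rfl | h
    · exact le_trans (le_max_right m0 y) (le_maxfold xs _)
    · exact ih _ h

theorem maxfold_mem (xs : List Int) (m0 : Int) :
    xs.foldl max m0 = m0 ∨ xs.foldl max m0 ∈ xs := by
  induction xs generalizing m0 with
  | nil => exact Or.inl rfl
  | cons x xs ih =>
    rcases ih (max m0 x) with h | h
    · rcases max_choice m0 x with hc | hc
      · exact Or.inl (by rw [List.foldl_cons, h, hc])
      · exact Or.inr (by rw [List.foldl_cons, h, hc]; exact List.mem_cons_self)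
    · exact Or.inr (List.mem_cons_of_mem _ h)

-- the sum-of-positives fold as init + filtered sum (to transport across permutation)
theorem sumfold_eq (xs : List Int) (s0 : Int) :
    xs.foldl (fun s i => if i > 0 then s + i else s) s0
    = s0 + (xs.filter (fun i => 0 < i)).sum := by
  induction xs generalizing s0 with
  | nil => simp
  | cons x xs ih =>
    by_cases h : x > 0 <;> simp [List.foldl_cons, h, ih]; ring

-- last element of the sorted list: pyGet? at -1 is getLast?
theorem pyGet_neg_one (xs : List Int) (x : Int) (t : List Int) (h : xs = x :: t) :
    PySem.List.pyGet? xs (-1) = some (xs.getLast (by simp [h])) := by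
  subst h
  simp [PySem.List.pyGet?, PySem.List.pyIdx?, List.getLast_eq_getElem]
  rfl

-- the last element of a ≤-pairwise list bounds all its members
theorem getLast_ge_of_pairwise (xs : List Int) (h : xs.Pairwise (· ≤ ·)) (hne : xs ≠ []) :
    ∀ y ∈ xs, y ≤ xs.getLast hne := by
  induction xs with
  | nil => cases hne rfl
  | cons x xs ih =>
    intro y hy
    rcases List.pairwise_cons.mp h with ⟨hx, hxs⟩
    cases xs with
    | nil =>
      simp at hy; simp [hy]
    | cons z zs =>
      rcases List.mem_cons.mp hy with rfl | h2
      · exact le_trans (hx _ List.mem_cons_self)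
          (ih hxs (by simp) _ List.mem_cons_self)
      · simpa [List.getLast_cons] using ih hxs (by simp) _ h2

-- ===== VERDICT (by name: the statement is the Claim_ definition above) =====
theorem alterantive_spec : Claim_equal_alterantive := by
  intro a _ hpre
  unfold Spec_alterantive alterantive alterantive_alt
  obtain ⟨x, t, rfl⟩ : ∃ x t, a = x :: t := by
    cases a with
    | nil => exact absurd rfl hpre
    | cons x t => exact ⟨x, t, rfl⟩
  -- B's side
  rw [List.foldl_cons]
  simp only []
  rw [bfold_split t x (if x > 0 then (0:Int) + x else 0)]
  -- A's side
  set b := PySem.List.sorted (x :: t) (fun y => y) false with hb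
  have hbne : b ≠ [] := by
    intro h
    have := (PySem.List.sorted_eq_nil_iff (x :: t) (fun y => y) false).mp h
    simp at this
  obtain ⟨y, s, hys⟩ : ∃ y s, b = y :: s := by
    cases hbb : b with
    | nil => exact absurd hbb hbne
    | cons y s => exact ⟨y, s, rfl⟩
  rw [pyGet_neg_one b y s hys]
  -- the last of sorted equals B's running maximum
  have hperm : b.Perm (x :: t) := PySem.List.sorted_perm _ _ _
  have hpw : b.Pairwise (· ≤ ·) := by
    simpa using PySem.List.sorted_pairwise (xs := x :: t) (key := fun y => y)
  have hlastmem : b.getLast hbne ∈ (x :: t) := hperm.mem_iff.mp (List.getLast_mem hbne)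
  have hub : ∀ z ∈ (x :: t), z ≤ b.getLast hbne := fun z hz =>
    getLast_ge_of_pairwise b hpw hbne z (hperm.mem_iff.mpr hz)
  have hmax : b.getLast hbne = t.foldl (fun m i => if i > m then i else m) x := by
    rw [maxfold_eq]
    apply le_antisymm
    · rcases List.mem_cons.mp hlastmem with h | h
      · rw [h]; exact le_maxfold t x
      · exact mem_le_maxfold t x _ h
    · rcases maxfold_mem t x with h | h
      · rw [h]; exact hub x List.mem_cons_self
      · exact hub _ (List.mem_cons_of_mem _ h)
  -- the two sums agree (permutation)
  have hsum : b.foldl (fun s i => if i > 0 then s + i else s) 0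
      = (x :: t).foldl (fun s i => if i > 0 then s + i else s) 0 := by
    rw [sumfold_eq, sumfold_eq]
    have : (b.filter (fun i => 0 < i)).Perm ((x :: t).filter (fun i => 0 < i)) :=
      hperm.filter _
    rw [this.sum_eq]
  have hsum' : (x :: t).foldl (fun s i => if i > 0 then s + i else s) 0
      = t.foldl (fun s i => if i > 0 then s + i else s) (if x > 0 then (0:Int) + x else 0) := by
    rw [List.foldl_cons]
  simp only [hmax, hsum, hsum']
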